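-- pv_equiv track=rewrite | github.com/koojun99/Code-test-Study | 프로그래머스/1/134240. 푸드 파이트 대회/푸드 파이트 대회.py | solution
-- ===== SOURCE A (Python) =====
-- def solution(food):
--     result = []
--     for i in range(1, len(food)):
--         for j in range(food[i]//2):
--             result.append(str(i))
--     result.append("0")
--     for i in range(len(food) - 1, 0, -1):
--         for j in range(food[i]//2):
--             result.append(str(i))
--     return "".join(result)
-- ===== SOURCE B (Python) =====
-- def solution(food):
--     s = "0"
--     for i in range(len(food) - 1, 0, -1):
--         t = str(i) * (food[i] // 2)
--         s = t + s + t
--     return s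
-- ===== Notes on version B (the rewrite author's own statement) =====
-- stated objective: simpler
-- what changed: B builds the palindrome inside-out with a single loop that wraps the current string between two copies of each food's token (s = t + s + t), instead of A's two separate mirrored passes of character-by-character appends joined at the end.
import Mathlib
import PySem

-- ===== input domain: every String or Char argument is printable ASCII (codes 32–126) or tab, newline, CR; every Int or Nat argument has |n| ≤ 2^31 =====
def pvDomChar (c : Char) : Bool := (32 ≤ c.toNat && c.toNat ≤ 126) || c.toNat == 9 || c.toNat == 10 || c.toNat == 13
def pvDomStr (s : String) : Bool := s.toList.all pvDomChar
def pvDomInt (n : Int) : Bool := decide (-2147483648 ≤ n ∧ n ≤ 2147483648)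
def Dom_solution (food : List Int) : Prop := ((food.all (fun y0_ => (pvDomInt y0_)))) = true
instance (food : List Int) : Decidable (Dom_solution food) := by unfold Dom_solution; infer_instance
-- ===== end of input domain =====

-- B builds the palindrome inside-out with one wrapping loop (s = t + s + t) instead of A's two mirrored passes; simpler decomposition, same output.

-- ===== PORT A =====
def solution (food : List Int) : String :=
  let result : List String := []
  let result := (PySem.List.pyRange 1 (food.length : Int) 1).foldl
    (fun acc i =>
      (PySem.List.pyRange 0 (PySem.Int.floordiv (PySem.List.pyGetD food i 0) 2) 1).foldl
        (fun acc2 _ => acc2 ++ [PySem.Int.toStr i]) acc) result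
  let result := result ++ ["0"]
  let result := (PySem.List.pyRange ((food.length : Int) - 1) 0 (-1)).foldl
    (fun acc i =>
      (PySem.List.pyRange 0 (PySem.Int.floordiv (PySem.List.pyGetD food i 0) 2) 1).foldl
        (fun acc2 _ => acc2 ++ [PySem.Int.toStr i]) acc) result
  PySem.Str.join "" result

-- ===== PORT B =====
-- str * int: exact — Python's s * n is n concatenated copies (empty for n ≤ 0)
def pyStrMul (s : String) (n : Int) : String :=
  String.ofList (PySem.List.pyRepeat s.toList n)

def solution_alt (food : List Int) : String :=
  (PySem.List.pyRange ((food.length : Int) - 1) 0 (-1)).foldl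
    (fun s i =>
      let t := pyStrMul (PySem.Int.toStr i) (PySem.Int.floordiv (PySem.List.pyGetD food i 0) 2)
      t ++ s ++ t) "0"

-- ===== PRECONDITION & SPEC =====
def Spec_solution (food : List Int) (out : String) : Prop := out = solution_alt food
instance (food : List Int) (out : String) : Decidable (Spec_solution food out) := by unfold Spec_solution; infer_instance

-- ===== CLAIM (what is proved, stated in full; the proofs are below) =====
def Claim_equal_solution : Prop := ∀ (food : List Int), Dom_solution food → Spec_solution food (solution food)

-- ===== LEMMAS AND PROOFS =====

-- joining with the empty separator is flattening
theorem join_nil_eq_flatten (L : List (List Char)) :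
    PySem.Chars.join [] L = L.flatten := by
  induction L with
  | nil => simp [PySem.Chars.join, List.intercalate]
  | cons a t ih =>
    cases t with
    | nil => simp [PySem.Chars.join, List.intercalate]
    | cons b u =>
      rw [PySem.Chars.join_cons_cons, ih]
      simp

-- A's inner loop appends copies of str(i)
theorem foldl_snoc_const {α β : Type} (l : List α) (x : β) (init : List β) :
    l.foldl (fun acc _ => acc ++ [x]) init = init ++ List.replicate l.length x := by
  induction l generalizing init with
  | nil => simp
  | cons a t ih => simp [List.foldl, ih, List.replicate_succ]

def blk (food : List Int) (i : Int) : List String :=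
  List.replicate (PySem.Int.floordiv (PySem.List.pyGetD food i 0) 2).toNat (PySem.Int.toStr i)

theorem inner_loop_eq (food : List Int) (i : Int) (init : List String) :
    (PySem.List.pyRange 0 (PySem.Int.floordiv (PySem.List.pyGetD food i 0) 2) 1).foldl
      (fun acc2 _ => acc2 ++ [PySem.Int.toStr i]) init = init ++ blk food i := by
  rw [foldl_snoc_const, PySem.List.length_pyRange_one]
  simp [blk]

theorem outer_loop_eq (food : List Int) (l : List Int) (init : List String) :
    l.foldl (fun acc i =>
      (PySem.List.pyRange 0 (PySem.Int.floordiv (PySem.List.pyGetD food i 0) 2) 1).foldl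
        (fun acc2 _ => acc2 ++ [PySem.Int.toStr i]) acc) init
    = init ++ l.flatMap (blk food) := by
  have h : ∀ acc i, (PySem.List.pyRange 0 (PySem.Int.floordiv (PySem.List.pyGetD food i 0) 2) 1).foldl
        (fun acc2 _ => acc2 ++ [PySem.Int.toStr i]) acc = acc ++ blk food i := fun acc i =>
    inner_loop_eq food i acc
  calc l.foldl (fun acc i =>
      (PySem.List.pyRange 0 (PySem.Int.floordiv (PySem.List.pyGetD food i 0) 2) 1).foldl
        (fun acc2 _ => acc2 ++ [PySem.Int.toStr i]) acc) init
      = l.foldl (fun acc i => acc ++ blk food i) init := by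
        exact PySem.List.foldl_congr_mem l _ _ init (by intro acc x _; exact h acc x)
    _ = init ++ l.flatMap (blk food) := PySem.List.foldl_append_eq_flatMap _ l init

-- chars of A's block for i = chars of B's token for i
def blkC (food : List Int) (i : Int) : List Char :=
  PySem.List.pyRepeat (PySem.Int.toStr i).toList (PySem.Int.floordiv (PySem.List.pyGetD food i 0) 2)

theorem blk_chars (food : List Int) (i : Int) :
    ((blk food i).map String.toList).flatten = blkC food i := by
  simp [blk, blkC, PySem.List.pyRepeat, List.map_replicate]

theorem flatMap_blk_chars (food : List Int) (l : List Int) :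
    ((l.flatMap (blk food)).map String.toList).flatten = (l.map (blkC food)).flatten := by
  induction l with
  | nil => simp
  | cons a t ih =>
    simp only [List.flatMap_cons, List.map_cons, List.map_append, List.flatten_append,
      List.flatten_cons, ih, blk_chars]

-- B's wrapping loop, at the character level
theorem wrap_foldl (g : Int → List Char) (m : List Int) (init : List Char) :
    m.foldl (fun s i => g i ++ s ++ g i) init
      = (m.reverse.map g).flatten ++ init ++ (m.map g).flatten := by
  induction m generalizing init with
  | nil => simp
  | cons a t ih =>
    rw [List.foldl_cons, ih]
    simp [List.append_assoc]

-- B's string fold commutes with toList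
theorem toList_wrap_foldl (g : Int → String) (m : List Int) (init : String) :
    (m.foldl (fun s i => g i ++ s ++ g i) init).toList
      = m.foldl (fun s i => (g i).toList ++ s ++ (g i).toList) init.toList := by
  induction m generalizing init with
  | nil => rfl
  | cons a t ih => simp [List.foldl_cons, ih]

-- ===== VERDICT (by name: the statement is the Claim_ definition above) =====
theorem solution_spec : Claim_equal_solution := by
  intro food _
  unfold Spec_solution solution solution_alt
  simp only []
  apply String.toList_inj.mp
  rw [outer_loop_eq, outer_loop_eq]
  rw [PySem.List.pyRange_neg_one_eq_reverse]
  have h01 : (0:Int) + 1 = 1 := by norm_num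
  have h2 : (food.length : Int) - 1 + 1 = (food.length : Int) := by ring
  rw [h01, h2]
  have hB := toList_wrap_foldl
    (fun i => pyStrMul (PySem.Int.toStr i) (PySem.Int.floordiv (PySem.List.pyGetD food i 0) 2))
    (PySem.List.pyRange 1 (food.length : Int) 1).reverse "0"
  have hw := wrap_foldl
    (fun i => blkC food i)
    (PySem.List.pyRange 1 (food.length : Int) 1).reverse ("0".toList)
  rw [hB]
  simp only [pyStrMul, String.toList_ofList] at *
  simp only [blkC] at hw
  rw [hw]
  simp only [PySem.Str.toList_join, List.reverse_reverse]
  have he : ("" : String).toList = ([] : List Char) := rfl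
  rw [he, join_nil_eq_flatten]
  have hb : blkC food = fun i =>
      PySem.List.pyRepeat (PySem.Int.toChars i) (PySem.List.pyGetD food i 0 / 2) := by
    funext i
    simp [blkC, PySem.Int.toList_toStr]
  simp [flatMap_blk_chars, hb]
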